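-- pv_equiv track=rewrite | github.com/harryviennot/fidly-backend | app/services/business_info.py | _translate_day_range
-- ===== SOURCE A (Python) =====
-- DAY_NAMES: dict[str, dict[str, str]] = {
--     "Mon": {"en": "Mon", "fr": "Lun"},
--     "Tue": {"en": "Tue", "fr": "Mar"},
--     "Wed": {"en": "Wed", "fr": "Mer"},
--     "Thu": {"en": "Thu", "fr": "Jeu"},
--     "Fri": {"en": "Fri", "fr": "Ven"},
--     "Sat": {"en": "Sat", "fr": "Sam"},
--     "Sun": {"en": "Sun", "fr": "Dim"},
-- }
--
-- def _translate_day_range(days: str, locale: str) -> str: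
--     """Translate day abbreviations in a day range string.
--
--     Handles formats like "Mon-Fri", "Sat", "Mon-Wed, Fri".
--     """
--     if locale == "en":
--         return days
--
--     result = days
--     for en_day, translations in DAY_NAMES.items():
--         localized = translations.get(locale, en_day)
--         result = result.replace(en_day, localized)
--     return result
-- ===== SOURCE B (Python) =====
-- # Locale-first translation table + one left-to-right scan (instead of seven
-- # whole-string .replace passes keyed by the English day).
-- DAY_TRANSLATIONS: dict[str, dict[str, str]] = {
--     "fr": {"Mon": "Lun", "Tue": "Mar", "Wed": "Mer", "Thu": "Jeu",
--            "Fri": "Ven", "Sat": "Sam", "Sun": "Dim"},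
-- }
--
--
-- def _translate_day_range(days: str, locale: str) -> str:
--     """Translate day abbreviations in a day range string."""
--     if locale == "en":
--         return days
--     table = DAY_TRANSLATIONS.get(locale)
--     if table is None:
--         return days
--     out = []
--     i = 0
--     n = len(days)
--     while i < n:
--         rep = table.get(days[i:i + 3])
--         if rep is not None:
--             out.append(rep)
--             i += 3
--         else:
--             out.append(days[i])
--             i += 1
--     return "".join(out)
-- ===== Notes on version B (the rewrite author's own statement) =====
-- stated objective: alternative
-- what changed: Replaces A's seven successive whole-string .replace passes (keyed by English day, per-day locale lookup) by a locale-first translation table consulted once and a single left-to-right scan that looks each 3-char window up in that table.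
import Mathlib
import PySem

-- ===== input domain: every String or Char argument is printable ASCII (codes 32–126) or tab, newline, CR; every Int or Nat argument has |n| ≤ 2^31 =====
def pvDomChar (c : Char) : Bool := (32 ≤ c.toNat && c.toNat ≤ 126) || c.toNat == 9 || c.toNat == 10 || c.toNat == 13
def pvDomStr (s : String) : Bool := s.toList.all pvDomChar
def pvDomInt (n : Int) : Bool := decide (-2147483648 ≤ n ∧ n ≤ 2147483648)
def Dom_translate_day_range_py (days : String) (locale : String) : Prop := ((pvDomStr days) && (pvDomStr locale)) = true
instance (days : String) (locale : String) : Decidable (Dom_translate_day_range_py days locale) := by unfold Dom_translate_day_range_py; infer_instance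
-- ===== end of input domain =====

-- B replaces A's seven successive whole-string .replace passes (keyed by English day, per-day
-- locale lookup) by a locale-first translation table consulted once plus one left-to-right scan
-- that looks each 3-char window up in it (objective: alternative).

-- ===== PORT A =====
def DAY_NAMES : PySem.Dict String (PySem.Dict String String) :=
  PySem.Dict.ofList [
    ("Mon", PySem.Dict.ofList [("en","Mon"),("fr","Lun")]),
    ("Tue", PySem.Dict.ofList [("en","Tue"),("fr","Mar")]),
    ("Wed", PySem.Dict.ofList [("en","Wed"),("fr","Mer")]),
    ("Thu", PySem.Dict.ofList [("en","Thu"),("fr","Jeu")]),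
    ("Fri", PySem.Dict.ofList [("en","Fri"),("fr","Ven")]),
    ("Sat", PySem.Dict.ofList [("en","Sat"),("fr","Sam")]),
    ("Sun", PySem.Dict.ofList [("en","Sun"),("fr","Dim")])]

def translate_day_range_py (days : String) (locale : String) : String :=
  if locale == "en" then days
  else (PySem.Dict.items DAY_NAMES).foldl
    (fun result p => PySem.Str.replace result p.1 (PySem.Dict.getD p.2 locale p.1)) days

-- ===== PORT B =====
-- Source B's locale-first translation table
def DAY_TRANSLATIONS : PySem.Dict String (PySem.Dict String String) :=
  PySem.Dict.ofList [
    ("fr", PySem.Dict.ofList [("Mon","Lun"),("Tue","Mar"),("Wed","Mer"),("Thu","Jeu"),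
                              ("Fri","Ven"),("Sat","Sam"),("Sun","Dim")])]

-- Source B's while loop over index i, as structural recursion on the remaining characters
-- (days[i:i+3] = take 3 of the rest; i += 3 / i += 1 = dropping 3 resp. 1 characters)
def scanDays (table : PySem.Dict String String) : List Char → List Char
  | [] => []
  | c :: t =>
    match PySem.Dict.get? table (String.ofList (List.take 3 (c :: t))) with
    | some rep => rep.toList ++ scanDays table (List.drop 2 t)
    | none => c :: scanDays table t
termination_by l => l.length
decreasing_by all_goals simp

def translate_day_range_py_alt (days : String) (locale : String) : String :=
  if locale == "en" then days
  else
    match PySem.Dict.get? DAY_TRANSLATIONS locale with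
    | none => days
    | some table => String.ofList (scanDays table days.toList)

-- ===== PRECONDITION & SPEC =====
def Spec_translate_day_range_py (days : String) (locale : String) (out : String) : Prop := out = translate_day_range_py_alt days locale
instance (days : String) (locale : String) (out : String) : Decidable (Spec_translate_day_range_py days locale out) := by unfold Spec_translate_day_range_py; infer_instance

-- ===== CLAIM (what is proved, stated in full; the proofs are below) =====
def Claim_equal_translate_day_range_py : Prop := ∀ (days : String) (locale : String), Dom_translate_day_range_py days locale → Spec_translate_day_range_py days locale (translate_day_range_py days locale)

-- ===== LEMMAS AND PROOFS =====

-- a clean structural form of Python's str.replace for a 3-character needle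
def repl3 (a b c : Char) (new : List Char) : List Char → List Char
  | [] => []
  | [x] => [x]
  | [x, y] => [x, y]
  | x :: y :: z :: t =>
    if x = a ∧ y = b ∧ z = c then new ++ repl3 a b c new t
    else x :: repl3 a b c new (y :: z :: t)

-- scanDays with the dict's underlying association list exposed
def scan3 (qs : List (String × String)) : List Char → List Char
  | [] => []
  | c :: t =>
    match (qs.find? (fun p => p.1 == String.ofList (List.take 3 (c :: t)))).map (fun p => p.2) with
    | some rep => rep.toList ++ scan3 qs (List.drop 2 t)
    | none => c :: scan3 qs t
termination_by l => l.length
decreasing_by all_goals simp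

def shapeTok (w : List Char) : Bool :=
  match w with
  | [u, v, w'] => u.isUpper && v.isLower && w'.isLower
  | _ => false

def goodT (qs : List (String × String)) : Prop :=
  ∀ p ∈ qs, shapeTok p.1.toList = true ∧ shapeTok p.2.toList = true ∧ ∀ q ∈ qs, p.2 ≠ q.1

def foldA (qs : List (String × String)) (l : List Char) : List Char :=
  qs.foldl (fun acc p => PySem.Chars.replace acc p.1.toList p.2.toList) l

lemma repl3_short (a b c : Char) (new l : List Char) (h : l.length ≤ 2) :
    repl3 a b c new l = l := by
  match l with
  | [] => rfl
  | [x] => rfl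
  | [x, y] => rfl
  | x :: y :: z :: t => simp at h

lemma repl3_cons_of (a b c : Char) (new : List Char) (x : Char) (S : List Char)
    (h : ∀ s0 s1 S'', S = s0 :: s1 :: S'' → ¬(x = a ∧ s0 = b ∧ s1 = c)) :
    repl3 a b c new (x :: S) = x :: repl3 a b c new S := by
  match S with
  | [] => rfl
  | [s0] => rfl
  | s0 :: s1 :: S'' =>
    have := h s0 s1 S'' rfl
    simp [repl3, this]

lemma go_eq (a b c : Char) (new : List Char) :
    ∀ (fuel : Nat) (l acc : List Char), l.length ≤ fuel →
      PySem.Chars.replace.go [a, b, c] new fuel l acc = acc.reverse ++ repl3 a b c new l := by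
  intro fuel
  induction fuel with
  | zero =>
    intro l acc h
    have : l = [] := by cases l <;> simp at h ⊢
    subst this
    rw [PySem.Chars.replace.go]
    simp [repl3]
  | succ n ih =>
    intro l acc h
    cases l with
    | nil => rw [PySem.Chars.replace.go]; simp [repl3]; omega
    | cons x t =>
      rw [PySem.Chars.replace.go]
      by_cases hp : [a, b, c].isPrefixOf (x :: t) = true
      · simp only [hp, if_true]
        obtain ⟨t', ht⟩ := List.isPrefixOf_iff_prefix.mp hp
        have hlen : t'.length ≤ n := by
          have := congrArg List.length ht
          simp at this h
          omega
        rw [show List.drop ([a,b,c].length) (x :: t) = t' by rw [← ht]; simp]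
        rw [ih t' (new.reverse ++ acc) hlen]
        rw [← ht]
        simp [repl3]
      · simp only [hp]
        have hlen : t.length ≤ n := by simp at h; omega
        rw [ih t (x :: acc) hlen]
        rw [repl3_cons_of a b c new x t ?_]
        · simp
        · intro s0 s1 S'' hS hc
          apply hp
          subst hS
          obtain ⟨h1, h2, h3⟩ := hc
          subst h1; subst h2; subst h3
          apply List.isPrefixOf_iff_prefix.mpr
          exact ⟨S'', rfl⟩

lemma replace_eq_repl3 (a b c : Char) (new l : List Char) :
    PySem.Chars.replace l [a, b, c] new = repl3 a b c new l := by
  rw [PySem.Chars.replace]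
  simp only [List.isEmpty_cons, Bool.false_eq_true]
  exact (go_eq a b c new l.length l [] le_rfl).trans (by simp)

lemma upper_not_lower (c : Char) (h : c.isUpper = true) : c.isLower = false := by
  simp [Char.isUpper, Char.isLower] at *
  simp [UInt32.le_iff_toNat_le, UInt32.lt_iff_toNat_lt] at *
  omega

lemma repl3_skip3 (a b c u v w : Char) (new S : List Char)
    (h0 : ¬(u = a ∧ v = b ∧ w = c)) (h1 : ¬ v = a) (h2 : ¬ w = a) :
    repl3 a b c new (u :: v :: w :: S) = u :: v :: w :: repl3 a b c new S := by
  rw [show repl3 a b c new (u :: v :: w :: S) = u :: repl3 a b c new (v :: w :: S) by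
        simp [repl3, h0],
      repl3_cons_of a b c new v (w :: S) (by intro s0 s1 S'' hS hc; exact h1 hc.1),
      repl3_cons_of a b c new w S (by intro s0 s1 S'' hS hc; exact h2 hc.1)]

lemma repl3_self (a b c : Char) (l : List Char) : repl3 a b c [a, b, c] l = l := by
  have key : ∀ (n : Nat) (l : List Char), l.length ≤ n → repl3 a b c [a, b, c] l = l := by
    intro n
    induction n with
    | zero => intro l hl; exact repl3_short a b c [a, b, c] l (by omega)
    | succ n ih =>
      intro l hl
      match l with
      | [] => rfl
      | [x] => rfl
      | [x, y] => rfl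
      | x :: y :: z :: t =>
        by_cases hc : x = a ∧ y = b ∧ z = c
        · simp [repl3, hc]
          obtain ⟨ha, hb, hcc⟩ := hc
          subst ha; subst hb; subst hcc
          simp [ih t (by simp at hl; omega)]
        · simp only [repl3, if_neg hc]
          have : repl3 a b c [a, b, c] (y :: z :: t) = y :: z :: t := by
            apply ih; simp at hl ⊢; omega
          rw [this]
  exact key l.length l le_rfl

lemma find?_key (qs : List (String × String)) (w : List Char) (q : String × String)
    (h : qs.find? (fun p => p.1 == String.ofList w) = some q) :
    q ∈ qs ∧ q.1.toList = w := by
  refine ⟨List.mem_of_find?_eq_some h, ?_⟩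
  have := List.find?_some h
  simp only [beq_iff_eq] at this
  rw [this, String.toList_ofList]

lemma shapeTok_elim (w : List Char) (h : shapeTok w = true) :
    ∃ u v w', w = [u, v, w'] ∧ u.isUpper = true ∧ v.isLower = true ∧ w'.isLower = true := by
  match w with
  | [u, v, w'] =>
    simp [shapeTok] at h
    exact ⟨u, v, w', rfl, h.1.1, h.1.2, h.2⟩
  | [] => simp [shapeTok] at h
  | [u] => simp [shapeTok] at h
  | [u, v] => simp [shapeTok] at h
  | u :: v :: w' :: x :: r => simp [shapeTok] at h

lemma find?_none_short (qs : List (String × String))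
    (hk : ∀ p ∈ qs, shapeTok p.1.toList = true) (w : List Char) (hw : w.length ≤ 2) :
    qs.find? (fun p => p.1 == String.ofList w) = none := by
  cases hf : qs.find? (fun p => p.1 == String.ofList w) with
  | none => rfl
  | some q =>
    exfalso
    obtain ⟨hm, hk3⟩ := find?_key qs w q hf
    have := hk q hm
    rw [hk3] at this
    match w, hw with
    | [], _ => simp [shapeTok] at this
    | [x], _ => simp [shapeTok] at this
    | [x, y], _ => simp [shapeTok] at this

lemma scan3_cons_short (qs : List (String × String))
    (hk : ∀ p ∈ qs, shapeTok p.1.toList = true) (c : Char) (t : List Char)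
    (h : (c :: t).length ≤ 2) : scan3 qs (c :: t) = c :: scan3 qs t := by
  rw [scan3, find?_none_short qs hk _ (by simp at h ⊢; omega)]
  simp

lemma scan3_short (qs : List (String × String))
    (hk : ∀ p ∈ qs, shapeTok p.1.toList = true) (l : List Char) (h : l.length ≤ 2) :
    scan3 qs l = l := by
  match l, h with
  | [], _ => simp [scan3]
  | [x], _ => rw [scan3_cons_short qs hk x [] (by simp)]; simp [scan3]
  | [x, y], _ =>
    rw [scan3_cons_short qs hk x [y] (by simp), scan3_cons_short qs hk y [] (by simp)]
    simp [scan3]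

lemma scan3_cons_lower (qs : List (String × String))
    (hk : ∀ p ∈ qs, shapeTok p.1.toList = true) (x : Char) (hx : x.isLower = true) (S : List Char) :
    scan3 qs (x :: S) = x :: scan3 qs S := by
  have hf : qs.find? (fun p => p.1 == String.ofList (List.take 3 (x :: S))) = none := by
    cases hf : qs.find? (fun p => p.1 == String.ofList (List.take 3 (x :: S))) with
    | none => rfl
    | some q =>
      exfalso
      obtain ⟨hm, hk3⟩ := find?_key qs _ q hf
      obtain ⟨u, v, w', hw, hu, _, _⟩ := shapeTok_elim _ (hk q hm)
      rw [hw] at hk3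
      have hxu : u = x := by
        have := congrArg (List.headI) hk3
        simpa using this
      rw [hxu] at hu
      rw [upper_not_lower x hu] at hx
      exact Bool.false_ne_true hx
  rw [scan3, hf]
  simp

lemma headLow (qs : List (String × String))
    (hv : ∀ p ∈ qs, shapeTok p.2.toList = true) (u : Char) (S : List Char) (s0 : Char) (rest : List Char)
    (h : scan3 qs (u :: S) = s0 :: rest) (hs0 : s0.isLower = true) :
    s0 = u ∧ rest = scan3 qs S := by
  rw [scan3] at h
  cases hf : qs.find? (fun p => p.1 == String.ofList (List.take 3 (u :: S))) with
  | some q =>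
    exfalso
    rw [hf] at h
    simp only [Option.map_some] at h
    obtain ⟨u', v', w', hw, hu', _, _⟩ := shapeTok_elim _ (hv q (List.mem_of_find?_eq_some hf))
    rw [hw] at h
    simp at h
    rw [← h.1] at hs0
    rw [upper_not_lower u' hu'] at hs0
    exact Bool.false_ne_true hs0
  | none =>
    rw [hf] at h
    simp only [Option.map_none] at h
    exact ⟨(List.cons.injEq _ _ _ _ ▸ h).1.symm ▸ rfl, by
      injection h with h1 h2; exact h2.symm⟩

lemma goodT_front (qs : List (String × String)) (p : String × String)
    (h : goodT (qs ++ [p])) : goodT qs := by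
  intro q hq
  have := h q (by simp [hq])
  exact ⟨this.1, this.2.1, fun r hr => this.2.2 r (by simp [hr])⟩

lemma M_lemma (qs : List (String × String)) (p : String × String) (a b c : Char)
    (h : goodT (qs ++ [p])) (hp3 : p.1.toList = [a, b, c]) :
    ∀ (n : Nat) (l : List Char), l.length ≤ n →
      repl3 a b c p.2.toList (scan3 qs l) = scan3 (qs ++ [p]) l := by
  have hmemp : p ∈ qs ++ [p] := by simp
  have hk : ∀ q ∈ qs, shapeTok q.1.toList = true := fun q hq => (h q (by simp [hq])).1
  have hk' : ∀ q ∈ qs ++ [p], shapeTok q.1.toList = true := fun q hq => (h q hq).1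
  have hv : ∀ q ∈ qs, shapeTok q.2.toList = true := fun q hq => (h q (by simp [hq])).2.1
  have hshape : shapeTok [a, b, c] = true := hp3 ▸ (h p hmemp).1
  have ha : a.isUpper = true := by simp [shapeTok] at hshape; exact hshape.1.1
  have hb : b.isLower = true := by simp [shapeTok] at hshape; exact hshape.1.2
  have hc : c.isLower = true := by simp [shapeTok] at hshape; exact hshape.2
  intro n
  induction n with
  | zero =>
    intro l hl
    have : l = [] := by cases l <;> simp at hl ⊢
    subst this
    simp [scan3, repl3]
  | succ n ih =>
    intro l hl
    match l with
    | [] => simp [scan3, repl3]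
    | [x] =>
      rw [scan3_short qs hk _ (by simp), scan3_short _ hk' _ (by simp)]
      exact repl3_short _ _ _ _ _ (by simp)
    | [x, y] =>
      rw [scan3_short qs hk _ (by simp), scan3_short _ hk' _ (by simp)]
      exact repl3_short _ _ _ _ _ (by simp)
    | x :: y :: z :: t =>
      cases hf : qs.find? (fun q => q.1 == String.ofList (List.take 3 (x :: y :: z :: t))) with
      | some q =>
        have hf' : (qs ++ [p]).find? (fun q => q.1 == String.ofList (List.take 3 (x :: y :: z :: t))) = some q := by
          rw [List.find?_append, hf]; rfl
        have e1 : scan3 qs (x :: y :: z :: t) = q.2.toList ++ scan3 qs t := by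
          rw [scan3, hf]; simp
        have e1' : scan3 (qs ++ [p]) (x :: y :: z :: t) = q.2.toList ++ scan3 (qs ++ [p]) t := by
          rw [scan3, hf']; simp
        have hqmem : q ∈ qs := (find?_key qs _ q hf).1
        obtain ⟨u, v, w', hw, hu, hvl, hwl⟩ := shapeTok_elim _ (hv q hqmem)
        have hne : q.2.toList ≠ [a, b, c] := by
          intro he
          have : q.2 = p.1 := String.toList_inj.mp (he.trans hp3.symm)
          exact (h q (by simp [hqmem])).2.2 p hmemp this
        rw [e1, e1', hw]
        simp only [List.cons_append, List.nil_append]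
        rw [repl3_skip3 a b c u v w' _ _ ?_ ?_ ?_]
        · rw [ih t (by simp at hl; omega)]
        · intro he
          apply hne
          rw [hw, he.1, he.2.1, he.2.2]
        · intro he
          rw [he] at hvl
          rw [upper_not_lower a ha] at hvl
          exact Bool.false_ne_true hvl
        · intro he
          rw [he] at hwl
          rw [upper_not_lower a ha] at hwl
          exact Bool.false_ne_true hwl
      | none =>
        by_cases hpm : (p.1 == String.ofList (List.take 3 (x :: y :: z :: t))) = true
        · have hxyz : ([a, b, c] : List Char) = [x, y, z] := by
            have h1 : p.1 = String.ofList [x, y, z] := by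
              have := beq_iff_eq.mp hpm
              rwa [show List.take 3 (x :: y :: z :: t) = [x, y, z] from rfl] at this
            have h2 := congrArg String.toList h1
            rw [hp3, String.toList_ofList] at h2
            exact h2
          have hxa : x = a := by injection hxyz with e1 e2; exact e1.symm
          have hyb : y = b := by
            injection hxyz with e1 e2; injection e2 with e3 e4; exact e3.symm
          have hzc : z = c := by
            injection hxyz with e1 e2; injection e2 with e3 e4; injection e4 with e5 e6
            exact e5.symm
          have hpm2 : (p.1 == String.ofList [x, y, z]) = true := hpm
          have hf' : (qs ++ [p]).find? (fun q => q.1 == String.ofList (List.take 3 (x :: y :: z :: t))) = some p := by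
            rw [List.find?_append, hf]
            simp [List.find?, hpm2]
          have e1' : scan3 (qs ++ [p]) (x :: y :: z :: t) = p.2.toList ++ scan3 (qs ++ [p]) t := by
            rw [scan3, hf']; simp
          have e1 : scan3 qs (x :: y :: z :: t) = x :: scan3 qs (y :: z :: t) := by
            rw [scan3, hf]; simp
          rw [e1, e1', scan3_cons_lower qs hk y (by rw [hyb]; exact hb),
              scan3_cons_lower qs hk z (by rw [hzc]; exact hc)]
          simp only [repl3, if_pos (And.intro hxa (And.intro hyb hzc))]
          rw [ih t (by simp at hl; omega)]
        · have hpm2 : (p.1 == String.ofList [x, y, z]) = false := by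
            cases hb2 : (p.1 == String.ofList [x, y, z]) with
            | true => exact absurd hb2 hpm
            | false => rfl
          have hf' : (qs ++ [p]).find? (fun q => q.1 == String.ofList (List.take 3 (x :: y :: z :: t))) = none := by
            rw [List.find?_append, hf]
            simp [List.find?, hpm2]
          have e1 : scan3 qs (x :: y :: z :: t) = x :: scan3 qs (y :: z :: t) := by
            rw [scan3, hf]; simp
          have e1' : scan3 (qs ++ [p]) (x :: y :: z :: t) = x :: scan3 (qs ++ [p]) (y :: z :: t) := by
            rw [scan3, hf']; simp
          rw [e1, e1']
          rw [repl3_cons_of a b c _ x _ ?_]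
          · rw [ih (y :: z :: t) (by simp at hl ⊢; omega)]
          · intro s0 s1 S'' hS hcon
            obtain ⟨hxa, hs0, hs1⟩ := hcon
            have h1 := headLow qs hv y (z :: t) s0 (s1 :: S'') hS (by rw [hs0]; exact hb)
            have h2 := headLow qs hv z t s1 S'' h1.2.symm (by rw [hs1]; exact hc)
            apply hpm
            rw [show List.take 3 (x :: y :: z :: t) = [x, y, z] from rfl]
            apply beq_iff_eq.mpr
            apply String.toList_inj.mp
            rw [hp3, String.toList_ofList, hxa, ← h1.1, ← h2.1, hs0, hs1]

lemma main_fold (qs : List (String × String)) (h : goodT qs) (l : List Char) :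
    foldA qs l = scan3 qs l := by
  induction qs using List.reverseRecOn generalizing l with
  | nil =>
    have key : ∀ (n : Nat) (l : List Char), l.length ≤ n → scan3 [] l = l := by
      intro n
      induction n with
      | zero => intro l hl; cases l <;> simp_all [scan3]
      | succ n ih =>
        intro l hl
        cases l with
        | nil => simp [scan3]
        | cons c t => rw [scan3]; simp [ih t (by simp at hl; omega)]
    rw [key l.length l le_rfl]; rfl
  | append_singleton qs p ih =>
    obtain ⟨a, b, c, hp3, _, _, _⟩ := shapeTok_elim _ ((h p (by simp)).1)
    have e : foldA (qs ++ [p]) l = PySem.Chars.replace (foldA qs l) p.1.toList p.2.toList := by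
      simp [foldA, List.foldl_append]
    rw [e, ih (goodT_front qs p h), hp3, replace_eq_repl3]
    exact M_lemma qs p a b c h hp3 l.length l le_rfl

lemma toList_foldStr (qs : List (String × String)) (s : String) :
    (qs.foldl (fun acc p => PySem.Str.replace acc p.1 p.2) s).toList = foldA qs s.toList := by
  induction qs generalizing s with
  | nil => rfl
  | cons p qs ih =>
    simp only [List.foldl_cons, foldA]
    rw [ih (PySem.Str.replace s p.1 p.2), foldA]
    rw [PySem.Str.toList_replace]

lemma scanDays_eq_scan3 (table : PySem.Dict String String) (l : List Char) :
    scanDays table l = scan3 (PySem.Dict.items table) l := by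
  have key : ∀ (n : Nat) (l : List Char), l.length ≤ n →
      scanDays table l = scan3 (PySem.Dict.items table) l := by
    intro n
    induction n with
    | zero =>
      intro l hl
      have : l = [] := by cases l <;> simp at hl ⊢
      subst this
      simp [scanDays, scan3]
    | succ n ih =>
      intro l hl
      cases l with
      | nil => simp [scanDays, scan3]
      | cons c t =>
        rw [scanDays, scan3, PySem.Dict.get?]
        cases hf : (PySem.Dict.items table).find?
            (fun p => p.1 == String.ofList (List.take 3 (c :: t))) with
        | none =>
          simp only [Option.map_none]
          rw [ih t (by simp at hl; omega)]
        | some q =>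
          simp only [Option.map_some]
          rw [ih (List.drop 2 t) (by simp at hl ⊢; omega)]
  exact key l.length l le_rfl

def frPairs : List (String × String) :=
  [("Mon","Lun"),("Tue","Mar"),("Wed","Mer"),("Thu","Jeu"),("Fri","Ven"),("Sat","Sam"),("Sun","Dim")]

def idPairs : List (String × String) :=
  [("Mon","Mon"),("Tue","Tue"),("Wed","Wed"),("Thu","Thu"),("Fri","Fri"),("Sat","Sat"),("Sun","Sun")]

lemma good_fr : goodT frPairs := by unfold goodT; decide

lemma gid (locale : String) (hen : ¬ locale = "en") (hfr : ¬ locale = "fr") (x y d : String) :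
    PySem.Dict.getD (PySem.Dict.ofList [("en", x), ("fr", y)]) locale d = d := by
  have h1 : ("en" == locale) = false := beq_eq_false_iff_ne.mpr (fun h => hen h.symm)
  have h2 : ("fr" == locale) = false := beq_eq_false_iff_ne.mpr (fun h => hfr h.symm)
  simp [PySem.Dict.getD, PySem.Dict.get?, PySem.Dict.ofList, PySem.Dict.update, PySem.Dict.insert,
        PySem.Dict.empty, PySem.Dict.contains, List.find?, h1, h2]

lemma foldA_id_gen (qs : List (String × String))
    (h : ∀ p ∈ qs, p.2 = p.1 ∧ p.1.toList.length = 3) (l : List Char) :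
    foldA qs l = l := by
  induction qs generalizing l with
  | nil => rfl
  | cons p qs ih =>
    obtain ⟨hqq, hq3⟩ := h p (by simp)
    have : PySem.Chars.replace l p.1.toList p.2.toList = l := by
      match hm : p.1.toList, hq3 with
      | [a, b, c], _ =>
        rw [hqq, hm, replace_eq_repl3, repl3_self]
    simp only [foldA, List.foldl_cons]
    rw [this]
    exact ih (fun q hq => h q (by simp [hq])) l

lemma items_DAY_NAMES : PySem.Dict.items DAY_NAMES = [
    ("Mon", PySem.Dict.ofList [("en","Mon"),("fr","Lun")]),
    ("Tue", PySem.Dict.ofList [("en","Tue"),("fr","Mar")]),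
    ("Wed", PySem.Dict.ofList [("en","Wed"),("fr","Mer")]),
    ("Thu", PySem.Dict.ofList [("en","Thu"),("fr","Jeu")]),
    ("Fri", PySem.Dict.ofList [("en","Fri"),("fr","Ven")]),
    ("Sat", PySem.Dict.ofList [("en","Sat"),("fr","Sam")]),
    ("Sun", PySem.Dict.ofList [("en","Sun"),("fr","Dim")])] := rfl

lemma get_fr : PySem.Dict.get? DAY_TRANSLATIONS "fr" = some (PySem.Dict.ofList frPairs) := by
  decide

lemma case_fr (days : String) : translate_day_range_py days "fr" = translate_day_range_py_alt days "fr" := by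
  have hA : translate_day_range_py days "fr" =
      frPairs.foldl (fun acc p => PySem.Str.replace acc p.1 p.2) days := rfl
  have hB : translate_day_range_py_alt days "fr" =
      String.ofList (scanDays (PySem.Dict.ofList frPairs) days.toList) := by
    rw [translate_day_range_py_alt, if_neg (by decide), get_fr]
  have hitems : PySem.Dict.items (PySem.Dict.ofList frPairs) = frPairs := rfl
  rw [hA, hB, scanDays_eq_scan3, hitems]
  apply String.toList_inj.mp
  rw [toList_foldStr, String.toList_ofList]
  exact main_fold frPairs good_fr days.toList

lemma get_other (locale : String) (hfr : ¬ locale = "fr") :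
    PySem.Dict.get? DAY_TRANSLATIONS locale = none := by
  have h2 : ("fr" == locale) = false := beq_eq_false_iff_ne.mpr (fun h => hfr h.symm)
  simp [DAY_TRANSLATIONS, PySem.Dict.get?, PySem.Dict.ofList, PySem.Dict.update, PySem.Dict.insert,
        PySem.Dict.empty, PySem.Dict.contains, List.find?, h2]

lemma case_id (days locale : String) (hen : ¬ locale = "en") (hfr : ¬ locale = "fr") :
    translate_day_range_py days locale = translate_day_range_py_alt days locale := by
  have hbeq : (locale == "en") = false := beq_eq_false_iff_ne.mpr hen
  have hid : ∀ p ∈ idPairs, p.2 = p.1 ∧ p.1.toList.length = 3 := by decide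
  have hA : translate_day_range_py days locale =
      idPairs.foldl (fun acc p => PySem.Str.replace acc p.1 p.2) days := by
    rw [translate_day_range_py, if_neg (by rw [hbeq]; exact Bool.false_ne_true)]
    rw [items_DAY_NAMES]
    simp only [List.foldl_cons, List.foldl_nil, gid locale hen hfr, idPairs]
  have hB : translate_day_range_py_alt days locale = days := by
    rw [translate_day_range_py_alt, if_neg (by rw [hbeq]; exact Bool.false_ne_true),
        get_other locale hfr]
  rw [hA, hB]
  apply String.toList_inj.mp
  rw [toList_foldStr]
  exact foldA_id_gen idPairs hid days.toList

-- ===== VERDICT (by name: the statement is the Claim_ definition above) =====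
theorem translate_day_range_py_spec : Claim_equal_translate_day_range_py := by
  intro days locale _
  unfold Spec_translate_day_range_py
  by_cases hen : locale = "en"
  · subst hen
    simp [translate_day_range_py, translate_day_range_py_alt]
  · by_cases hfr : locale = "fr"
    · subst hfr; exact case_fr days
    · exact case_id days locale hen hfr
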